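-- pv_equiv track=rewrite | github.com/Rrominet/py-utils | boilerplate/cpp/__init__.py | namespaceFromLine
-- ===== SOURCE A (Python) =====
-- def whitespacesCleaned(line) :
--     while "\t" in line :
--         line = line.replace("\t", "")
--     while "  " in line :
--         line = line.replace("  ", " ")
--     while ", " in line :
--         line = line.replace(", ", ",")
--     while " ," in line :
--         line = line.replace(" ,", ",")
--     while "= " in line :
--         line = line.replace("= ", "=")
--     while " =" in line :
--         line = line.replace(" =", "=")
--     while "\n" in line :
--         line = line.replace("\n", "")
--     if len(line) == 0 :
--         return ""
--     if line[0] == " " :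
--         line = line[1:]
--     if len(line) == 0 :
--         return ""
--     if line[-1] == " " :
--         line = line[:-1]
--     return line
--
-- def namespaceFromLine(line) :
--     line = line.replace("namespace ", "")
--     line = line.replace("class ", "")
--     line = line.replace("struct ", "")
--     line = line.split(":")[0]
--     line = line.split("{")[0] #}
--     line = whitespacesCleaned(line)
--     while ("}" in line ) :
--         line = line.replace("}", "")
--     return line
-- ===== SOURCE B (Python) =====
-- # B: one linear scan pipeline (collapse / punct-space drop / newline drop) instead of
-- # A's repeated replace-to-fixpoint while loops; objective: simpler. Same return value.
--
-- def _clean(line):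
--     # pass 1: drop tabs, collapse each run of spaces to a single space
--     out = []
--     last = None
--     for c in line:
--         if c == "\t":
--             continue
--         if c == " " and last == " ":
--             continue
--         out.append(c)
--         last = c
--     # pass 2: drop each space whose immediate neighbour is a comma or an equals sign
--     keep = []
--     prev = None
--     n = len(out)
--     for i in range(n):
--         c = out[i]
--         nxt = out[i + 1] if i + 1 < n else None
--         if not (c == " " and (prev in (",", "=") or nxt in (",", "="))):
--             keep.append(c)
--         prev = c
--     # pass 3: drop newlines, then strip at most one leading / trailing space
--     s = "".join(c for c in keep if c != "\n")
--     if s.startswith(" "):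
--         s = s[1:]
--     if s.endswith(" "):
--         s = s[:-1]
--     return s
--
-- def namespaceFromLine(line):
--     line = line.replace("namespace ", "").replace("class ", "").replace("struct ", "")
--     line = line.split(":")[0].split("{")[0]
--     return _clean(line).replace("}", "")
-- ===== Notes on version B (the rewrite author's own statement) =====
-- stated objective: simpler
-- what changed: whitespacesCleaned's seven replace-to-fixpoint while loops are replaced by three linear scans: one pass that skips tabs and collapses space runs, one pass dropping each space adjacent to a comma or equals sign, and a newline-filter plus one-space strip.
import Mathlib
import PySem

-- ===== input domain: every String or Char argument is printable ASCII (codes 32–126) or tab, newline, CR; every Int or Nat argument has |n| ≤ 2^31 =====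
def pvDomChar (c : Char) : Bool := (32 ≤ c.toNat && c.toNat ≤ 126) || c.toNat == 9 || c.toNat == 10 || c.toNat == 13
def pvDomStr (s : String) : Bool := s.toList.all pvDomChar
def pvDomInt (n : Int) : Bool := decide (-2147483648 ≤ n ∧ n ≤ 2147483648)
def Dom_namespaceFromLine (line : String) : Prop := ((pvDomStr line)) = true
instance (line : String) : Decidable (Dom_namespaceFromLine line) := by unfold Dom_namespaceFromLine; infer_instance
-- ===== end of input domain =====

-- B rewrites whitespacesCleaned as three linear scans (tab skip + space-run collapse,
-- dropping each space adjacent to a comma or equals sign, newline drop + one-space strip)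
-- instead of A's seven replace-to-fixpoint while loops; objective: simpler.

-- ===== PORT A =====

-- 'while old in line: line = line.replace(old, new)': fuel-guarded loop (fuel only
-- makes the recursion total; every loop body here strictly shortens the string)
def pyStrWhileReplace (old new : List Char) : Nat → List Char → List Char
  | 0, s => s
  | fuel + 1, s =>
      if PySem.Chars.isIn old s then pyStrWhileReplace old new fuel (PySem.Chars.replace s old new)
      else s

-- literal port of whitespacesCleaned (on the char list)
def whitespacesCleanedA (s : List Char) : List Char :=
  let s1 := pyStrWhileReplace ['\t'] [] (s.length + 1) s
  let s2 := pyStrWhileReplace [' ', ' '] [' '] (s1.length + 1) s1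
  let s3 := pyStrWhileReplace [',', ' '] [','] (s2.length + 1) s2
  let s4 := pyStrWhileReplace [' ', ','] [','] (s3.length + 1) s3
  let s5 := pyStrWhileReplace ['=', ' '] ['='] (s4.length + 1) s4
  let s6 := pyStrWhileReplace [' ', '='] ['='] (s5.length + 1) s5
  let s7 := pyStrWhileReplace ['\n'] [] (s6.length + 1) s6
  if s7.length = 0 then []
  else
    let s8 := if s7.head? = some ' ' then s7.tail else s7
    if s8.length = 0 then []
    else if s8.getLast? = some ' ' then s8.dropLast else s8

def namespaceFromLine (line : String) : String :=
  let l0 := line.toList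
  let l1 := PySem.Chars.replace l0 ['n','a','m','e','s','p','a','c','e',' '] []
  let l2 := PySem.Chars.replace l1 ['c','l','a','s','s',' '] []
  let l3 := PySem.Chars.replace l2 ['s','t','r','u','c','t',' '] []
  let l4 := (PySem.Chars.splitOn l3 [':']).headD []
  let l5 := (PySem.Chars.splitOn l4 ['{']).headD []
  let l6 := whitespacesCleanedA l5
  let l7 := pyStrWhileReplace ['}'] [] (l6.length + 1) l6
  String.ofList l7

-- ===== PORT B =====

-- pass 1: drop tabs, collapse space runs ('last' = last emitted char)
def pass1Alt : Option Char → List Char → List Char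
  | _, [] => []
  | last, c :: rest =>
      if c = '\t' then pass1Alt last rest
      else if c = ' ' ∧ last = some ' ' then pass1Alt last rest
      else c :: pass1Alt (some c) rest

-- pass 2: drop each space whose immediate neighbour is a comma or an equals sign
def pass2Alt : Option Char → List Char → List Char
  | _, [] => []
  | prev, c :: rest =>
      if c = ' ' ∧ ((prev = some ',' ∨ prev = some '=') ∨ (rest.head? = some ',' ∨ rest.head? = some '=')) then
        pass2Alt (some c) rest
      else c :: pass2Alt (some c) rest

-- pass 3: drop newlines, strip at most one leading / trailing space
def cleanAlt (s : List Char) : List Char :=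
  let out := pass1Alt none s
  let keep := pass2Alt none out
  let t := keep.filter (fun c => c ≠ '\n')
  let t1 := if t.head? = some ' ' then t.tail else t
  if t1.getLast? = some ' ' then t1.dropLast else t1

def namespaceFromLine_alt (line : String) : String :=
  let l0 := line.toList
  let l1 := PySem.Chars.replace l0 ['n','a','m','e','s','p','a','c','e',' '] []
  let l2 := PySem.Chars.replace l1 ['c','l','a','s','s',' '] []
  let l3 := PySem.Chars.replace l2 ['s','t','r','u','c','t',' '] []
  let l4 := (PySem.Chars.splitOn l3 [':']).headD []
  let l5 := (PySem.Chars.splitOn l4 ['{']).headD []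
  let l6 := cleanAlt l5
  let l7 := PySem.Chars.replace l6 ['}'] []
  String.ofList l7

-- ===== PRECONDITION & SPEC =====
def Spec_namespaceFromLine (line : String) (out : String) : Prop := out = namespaceFromLine_alt line
instance (line : String) (out : String) : Decidable (Spec_namespaceFromLine line out) := by unfold Spec_namespaceFromLine; infer_instance

-- ===== CLAIM (what is proved, stated in full; the proofs are below) =====
def Claim_equal_namespaceFromLine : Prop := ∀ (line : String), Dom_namespaceFromLine line → Spec_namespaceFromLine line (namespaceFromLine line)

-- ===== LEMMAS AND PROOFS =====


-- A's replace: PySem.Chars.replace as a direct structural recursion (old ≠ [])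
def rrep (o : Char) (os new : List Char) : List Char → List Char
  | [] => []
  | c :: t =>
      if (o :: os).isPrefixOf (c :: t) then new ++ rrep o os new (t.drop os.length)
      else c :: rrep o os new t
  termination_by l => l.length
  decreasing_by
  · simp
  · simp

theorem go_eq (o : Char) (os new : List Char) :
    ∀ (fuel : Nat) (l acc : List Char), l.length ≤ fuel →
      PySem.Chars.replace.go (o :: os) new fuel l acc = acc.reverse ++ rrep o os new l := by
  intro fuel
  induction fuel with
  | zero =>
    intro l acc h
    cases l with
    | nil => simp [PySem.Chars.replace.go, rrep]
    | cons c t => simp at h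
  | succ f ih =>
    intro l acc h
    match l with
    | [] => simp [PySem.Chars.replace.go, rrep]
    | c :: t =>
      rw [PySem.Chars.replace.go]
      rw [rrep]
      by_cases hp : (o :: os).isPrefixOf (c :: t)
      · simp only [hp, if_true]
        rw [ih]
        · simp
        · simp at h ⊢; omega
      · simp only [hp]
        rw [ih t (c :: acc) (by simp at h; omega)]
        simp

theorem replace_eq_rrep (o : Char) (os new s : List Char) :
    PySem.Chars.replace s (o :: os) new = rrep o os new s := by
  rw [PySem.Chars.replace]
  simp [go_eq o os new s.length s [] (le_refl _)]

-- step shapes of the five rrep instances used by A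
theorem rrep_nil (o : Char) (os new : List Char) : rrep o os new [] = [] := by rw [rrep]

theorem del1_cons (c x : Char) (t : List Char) :
    rrep c [] [] (x :: t) = if x = c then rrep c [] [] t else x :: rrep c [] [] t := by
  rw [rrep]
  by_cases h : x = c
  · subst h; simp [List.isPrefixOf_cons₂, List.isPrefixOf_nil_left]
  · simp [List.isPrefixOf_cons₂, h, Ne.symm h]
theorem two_cons (a b r c : Char) (t : List Char) :
    rrep a [b] [r] (c :: t) =
      if c = a ∧ t.head? = some b then r :: rrep a [b] [r] t.tail else c :: rrep a [b] [r] t := by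
  rw [rrep]
  by_cases hc : c = a
  · subst hc
    cases t with
    | nil => simp [List.isPrefixOf_cons₂, List.isPrefixOf_cons_nil]
    | cons x u =>
      by_cases hx : x = b
      · subst hx; simp [List.isPrefixOf_cons₂, List.isPrefixOf_nil_left]
      · simp [List.isPrefixOf_cons₂, hx, Ne.symm hx]
  · simp [List.isPrefixOf_cons₂, hc, Ne.symm hc]
theorem rr_singleton (c : Char) (s : List Char) :
    rrep c [] [] s = s.filter (fun x => x ≠ c) := by
  induction s with
  | nil => rw [rrep_nil]; rfl
  | cons x t ih => rw [del1_cons]; by_cases h : x = c <;> simp [h, ih]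
theorem two_infix_cons (a b c : Char) (t : List Char) :
    [a, b] <:+: (c :: t) ↔ (c = a ∧ t.head? = some b) ∨ [a, b] <:+: t := by
  rw [List.infix_cons_iff]
  constructor
  · rintro (h | h)
    · rw [List.cons_prefix_cons] at h
      obtain ⟨h1, h2⟩ := h
      cases t with
      | nil => simp at h2
      | cons x u =>
        rw [List.cons_prefix_cons] at h2
        exact Or.inl ⟨h1.symm, by simp [h2.1]⟩
    · exact Or.inr h
  · rintro (⟨h1, h2⟩ | h)
    · cases t with
      | nil => simp at h2
      | cons x u =>
        left
        rw [List.cons_prefix_cons, List.cons_prefix_cons]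
        simp at h2
        simp [h1, h2]
    · exact Or.inr h

-- generic single-pass while loop: if one replace reaches a fixpoint, the loop is one replace
theorem loop_single (pat rep : List Char) (f : Nat) (s : List Char)
    (hfix : PySem.Chars.isIn pat (PySem.Chars.replace s pat rep) = false)
    (hid : PySem.Chars.isIn pat s = false → PySem.Chars.replace s pat rep = s) :
    pyStrWhileReplace pat rep (f + 1) s = PySem.Chars.replace s pat rep := by
  rw [pyStrWhileReplace]
  cases h : PySem.Chars.isIn pat s with
  | false => simp [hid h]
  | true =>
    simp only [if_true]
    cases f with
    | zero => rw [pyStrWhileReplace]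
    | succ g => rw [pyStrWhileReplace]; simp [hfix]

-- collapse of "  " → " ": canonical form
def ddC : List Char → List Char
  | [] => []
  | c :: t => if c = ' ' ∧ t.head? = some ' ' then ddC t else c :: ddC t

theorem ddC_head (s : List Char) : (ddC s).head? = s.head? := by
  induction s with
  | nil => rfl
  | cons c t ih =>
    rw [ddC]
    by_cases h : c = ' ' ∧ t.head? = some ' '
    · simp [h, ih, h.2, h.1]
    · simp [h]

theorem rrep_cs_head (s : List Char) : (rrep ' ' [' '] [' '] s).head? = s.head? := by
  cases s with
  | nil => rw [rrep_nil]
  | cons c t =>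
    rw [two_cons]
    by_cases h : c = ' ' ∧ t.head? = some ' '
    · simp only [h, if_true]; simp [h.1]
    · simp [h]
theorem dd_cs : ∀ (s : List Char),
    ddC (rrep ' ' [' '] [' '] s) = ddC s ∧
      ddC (' ' :: rrep ' ' [' '] [' '] s) = ddC (' ' :: s)
  | [] => by rw [rrep_nil]; exact ⟨rfl, rfl⟩
  | c :: t => by
    rw [two_cons]
    by_cases h : c = ' ' ∧ t.head? = some ' '
    · obtain ⟨hc, ht⟩ := h
      subst hc
      cases t with
      | nil => simp at ht
      | cons x u =>
        simp only [List.head?_cons, Option.some_inj] at ht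
        subst ht
        simp only [List.head?_cons, List.tail_cons, and_self, if_true, if_pos]
        have h2 := (dd_cs u).2
        constructor
        · rw [h2]
          conv_rhs => rw [ddC]
          simp
        · rw [show ddC (' ' :: ' ' :: rrep ' ' [' '] [' '] u) = ddC (' ' :: rrep ' ' [' '] [' '] u) by
            rw [ddC]; simp]
          rw [h2]
          conv_rhs => rw [show ddC (' ' :: ' ' :: ' ' :: u) = ddC (' ' :: ' ' :: u) by rw [ddC]; simp]
          conv_rhs => rw [show ddC (' ' :: ' ' :: u) = ddC (' ' :: u) by rw [ddC]; simp]
    · simp only [h, if_false, if_neg h]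
      have hh := rrep_cs_head t
      have h1 : ddC (c :: rrep ' ' [' '] [' '] t) = ddC (c :: t) := by
        conv_lhs => rw [ddC]
        conv_rhs => rw [ddC]
        rw [hh, (dd_cs t).1]
      refine ⟨h1, ?_⟩
      by_cases hc : c = ' '
      · subst hc
        have ht : t.head? ≠ some ' ' := fun hx => h ⟨rfl, hx⟩
        rw [show ddC (' ' :: ' ' :: rrep ' ' [' '] [' '] t) = ddC (' ' :: rrep ' ' [' '] [' '] t) by
          rw [ddC]; simp]
        rw [(dd_cs t).2]
        conv_rhs => rw [show ddC (' ' :: ' ' :: t) = ddC (' ' :: t) by rw [ddC]; simp]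
      · rw [show ddC (' ' :: c :: rrep ' ' [' '] [' '] t) = ' ' :: ddC (c :: rrep ' ' [' '] [' '] t) by
          rw [ddC]; simp [hc]]
        rw [h1]
        conv_rhs => rw [show ddC (' ' :: c :: t) = ' ' :: ddC (c :: t) by rw [ddC]; simp [hc]]
  termination_by s => s.length
  decreasing_by all_goals (simp_all; try omega)
theorem noTwo_ddC (s : List Char) : ¬ [' ', ' '] <:+: ddC s := by
  induction s with
  | nil => rw [ddC]; simp
  | cons c t ih =>
    rw [ddC]
    by_cases h : c = ' ' ∧ t.head? = some ' '
    · simpa [h] using ih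
    · rw [if_neg h, two_infix_cons]
      push_neg
      refine ⟨fun hc => ?_, ih⟩
      rw [ddC_head] at *
      intro hx
      exact h ⟨hc, hx⟩
theorem ddC_id (s : List Char) (h : ¬ [' ', ' '] <:+: s) : ddC s = s := by
  induction s with
  | nil => rw [ddC]
  | cons c t ih =>
    rw [two_infix_cons] at h
    push_neg at h
    rw [ddC, if_neg (fun hx => h.1 hx.1 hx.2), ih h.2]
theorem cs_len : ∀ (s : List Char), (rrep ' ' [' '] [' '] s).length ≤ s.length
  | [] => by rw [rrep_nil]
  | c :: t => by
    rw [two_cons]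
    by_cases h : c = ' ' ∧ t.head? = some ' '
    · rw [if_pos h]
      have := cs_len t.tail
      have : t.tail.length = t.length - 1 := List.length_tail
      simp only [List.length_cons]
      omega
    · rw [if_neg h]
      have := cs_len t
      simp only [List.length_cons]
      omega
  termination_by s => s.length
  decreasing_by all_goals (simp [List.length_tail]; try omega)
theorem cs_len_lt : ∀ (s : List Char), [' ', ' '] <:+: s →
    (rrep ' ' [' '] [' '] s).length < s.length
  | [], h => by simp at h
  | c :: t, h => by
    rw [two_cons]
    by_cases hm : c = ' ' ∧ t.head? = some ' '
    · rw [if_pos hm]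
      cases t with
      | nil => simp at hm
      | cons x u =>
        have := cs_len u
        simp only [List.tail_cons, List.length_cons]
        omega
    · rw [if_neg hm]
      rw [two_infix_cons] at h
      have hinf : [' ', ' '] <:+: t := by
        rcases h with h | h
        · exact absurd h hm
        · exact h
      have := cs_len_lt t hinf
      simp only [List.length_cons]
      omega
  termination_by s _ => s.length
  decreasing_by simp
theorem loop_collapse : ∀ (f : Nat) (s : List Char), s.length ≤ f →
    pyStrWhileReplace [' ', ' '] [' '] f s = ddC s := by
  intro f
  induction f with
  | zero =>
    intro s h
    obtain rfl : s = [] := by cases s <;> simp_all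
    rw [pyStrWhileReplace, ddC]
  | succ g ih =>
    intro s h
    rw [pyStrWhileReplace]
    cases hIn : PySem.Chars.isIn [' ', ' '] s with
    | false =>
      rw [if_neg (by simp [hIn])]
      exact (ddC_id s ((PySem.Chars.isIn_eq_false_iff _ _).mp hIn)).symm
    | true =>
      rw [if_pos rfl, replace_eq_rrep]
      have hinf : [' ', ' '] <:+: s := (PySem.Chars.isIn_iff_infix _ _).mp hIn
      rw [ih _ (by have := cs_len_lt s hinf; omega)]
      exact (dd_cs s).1
def dhs (s : List Char) : List Char := if s.head? = some ' ' then s.tail else s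

theorem dhs_len (s : List Char) : (dhs s).length ≤ s.length := by
  rw [dhs]; split <;> simp [List.length_tail]

-- spaces adjacent to p removed (combined effect of A's two p-loops)
def delP (p : Char) : List Char → List Char
  | [] => []
  | c :: t =>
      if c = p then c :: delP p (dhs t)
      else if c = ' ' ∧ t.head? = some p then delP p t
      else c :: delP p t
  termination_by l => l.length
  decreasing_by
  · have := dhs_len t; simp at this ⊢; omega
  · simp
  · simp

-- spaces adjacent to ',' or '=' removed
def allDel : List Char → List Char
  | [] => []
  | c :: t =>
      if c = ',' ∨ c = '=' then c :: allDel (dhs t)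
      else if c = ' ' ∧ (t.head? = some ',' ∨ t.head? = some '=') then allDel t
      else c :: allDel t
  termination_by l => l.length
  decreasing_by
  · have := dhs_len t; simp at this ⊢; omega
  · simp
  · simp

-- afterRun p := rrep p [' '] [p]  (one pass of 'p ' → 'p');  beforeRun p := rrep ' ' [p] [p]
theorem after_head (p : Char) (s : List Char) : (rrep p [' '] [p] s).head? = s.head? := by
  cases s with
  | nil => rw [rrep_nil]
  | cons c t =>
    rw [two_cons]
    by_cases h : c = p ∧ t.head? = some ' '
    · simp only [h, if_true]; simp [h.1]
    · simp [h]
theorem noTwo_cons (c : Char) (t : List Char) (h : ¬ [' ', ' '] <:+: (c :: t)) :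
    ¬ (c = ' ' ∧ t.head? = some ' ') ∧ ¬ [' ', ' '] <:+: t := by
  rw [two_infix_cons] at h
  push_neg at h
  exact ⟨fun hx => h.1 hx.1 hx.2, h.2⟩


theorem after_id (p : Char) : ∀ (s : List Char), ¬ [p, ' '] <:+: s → rrep p [' '] [p] s = s := by
  intro s
  induction s with
  | nil => intro _; rw [rrep_nil]
  | cons c t ih =>
    intro h
    rw [two_infix_cons] at h
    push_neg at h
    rw [two_cons, if_neg (fun hx => h.1 hx.1 hx.2), ih h.2]
theorem after_no (p : Char) : ∀ (s : List Char), ¬ [' ', ' '] <:+: s →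
    ¬ [p, ' '] <:+: rrep p [' '] [p] s
  | [], _ => by rw [rrep_nil]; simp
  | c :: t, hs => by
    obtain ⟨hs1, hs2⟩ := noTwo_cons c t hs
    rw [two_cons]
    by_cases hm : c = p ∧ t.head? = some ' '
    · rw [if_pos hm]
      cases t with
      | nil => simp at hm
      | cons x u =>
        simp only [List.head?_cons, Option.some_inj] at hm
        obtain ⟨hc, hx⟩ := hm
        subst hx
        obtain ⟨hu1, hu2⟩ := noTwo_cons ' ' u hs2
        simp only [List.tail_cons]
        rw [two_infix_cons]
        push_neg
        refine ⟨fun _ => ?_, after_no p u hu2⟩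
        rw [after_head]
        intro hh
        exact hu1 ⟨rfl, hh⟩
    · rw [if_neg hm, two_infix_cons]
      push_neg
      refine ⟨fun hc => ?_, after_no p t hs2⟩
      rw [after_head]
      intro hh
      exact hm ⟨hc, hh⟩
  termination_by s _ => s.length
  decreasing_by all_goals (simp_all; try omega)
theorem after_noTwo (p : Char) (hp : p ≠ ' ') : ∀ (s : List Char), ¬ [' ', ' '] <:+: s →
    ¬ [' ', ' '] <:+: rrep p [' '] [p] s
  | [], _ => by rw [rrep_nil]; simp
  | c :: t, hs => by
    obtain ⟨hs1, hs2⟩ := noTwo_cons c t hs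
    rw [two_cons]
    by_cases hm : c = p ∧ t.head? = some ' '
    · rw [if_pos hm]
      cases t with
      | nil => simp at hm
      | cons x u =>
        simp only [List.head?_cons, Option.some_inj] at hm
        obtain ⟨hc, hx⟩ := hm
        subst hx
        obtain ⟨hu1, hu2⟩ := noTwo_cons ' ' u hs2
        simp only [List.tail_cons]
        rw [two_infix_cons]
        push_neg
        exact ⟨fun hc' => absurd hc' hp, after_noTwo p hp u hu2⟩
    · rw [if_neg hm, two_infix_cons]
      push_neg
      refine ⟨fun hc => ?_, after_noTwo p hp t hs2⟩
      rw [after_head]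
      intro hh
      exact hs1 ⟨hc, hh⟩
  termination_by s _ => s.length
  decreasing_by all_goals (simp_all; try omega)
theorem before_head (p : Char) (s : List Char) :
    (rrep ' ' [p] [p] s).head? = s.head? ∨
      ((rrep ' ' [p] [p] s).head? = some p ∧ s.head? = some ' ') := by
  cases s with
  | nil => left; rw [rrep_nil]
  | cons c t =>
    rw [two_cons]
    by_cases h : c = ' ' ∧ t.head? = some p
    · right; simp [h]
    · left; simp [h]
theorem before_id (p : Char) : ∀ (s : List Char), ¬ [' ', p] <:+: s → rrep ' ' [p] [p] s = s := by
  intro s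
  induction s with
  | nil => intro _; rw [rrep_nil]
  | cons c t ih =>
    intro h
    rw [two_infix_cons] at h
    push_neg at h
    rw [two_cons, if_neg (fun hx => h.1 hx.1 hx.2), ih h.2]
theorem before_no (p : Char) (hp : p ≠ ' ') : ∀ (s : List Char), ¬ [' ', ' '] <:+: s →
    ¬ [' ', p] <:+: rrep ' ' [p] [p] s
  | [], _ => by rw [rrep_nil]; simp
  | c :: t, hs => by
    obtain ⟨hs1, hs2⟩ := noTwo_cons c t hs
    rw [two_cons]
    by_cases hm : c = ' ' ∧ t.head? = some p
    · rw [if_pos hm]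
      cases t with
      | nil => simp at hm
      | cons x u =>
        simp only [List.head?_cons, Option.some_inj] at hm
        obtain ⟨hc, hx⟩ := hm
        subst x
        obtain ⟨hu1, hu2⟩ := noTwo_cons p u hs2
        simp only [List.tail_cons]
        rw [two_infix_cons]
        push_neg
        exact ⟨fun hc' => absurd hc' hp, before_no p hp u hu2⟩
    · rw [if_neg hm, two_infix_cons]
      push_neg
      refine ⟨fun hc => ?_, before_no p hp t hs2⟩
      intro hh
      rcases before_head p t with hb | hb
      · rw [hb] at hh
        exact hm ⟨hc, hh⟩
      · exact hs1 ⟨hc, hb.2⟩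
  termination_by s _ => s.length
  decreasing_by all_goals (simp_all; try omega)
theorem before_noTwo (p : Char) (hp : p ≠ ' ') : ∀ (s : List Char), ¬ [' ', ' '] <:+: s →
    ¬ [' ', ' '] <:+: rrep ' ' [p] [p] s
  | [], _ => by rw [rrep_nil]; simp
  | c :: t, hs => by
    obtain ⟨hs1, hs2⟩ := noTwo_cons c t hs
    rw [two_cons]
    by_cases hm : c = ' ' ∧ t.head? = some p
    · rw [if_pos hm]
      cases t with
      | nil => simp at hm
      | cons x u =>
        simp only [List.head?_cons, Option.some_inj] at hm
        obtain ⟨hc, hx⟩ := hm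
        subst x
        obtain ⟨hu1, hu2⟩ := noTwo_cons p u hs2
        simp only [List.tail_cons]
        rw [two_infix_cons]
        push_neg
        exact ⟨fun hc' => absurd hc' hp, before_noTwo p hp u hu2⟩
    · rw [if_neg hm, two_infix_cons]
      push_neg
      refine ⟨fun hc => ?_, before_noTwo p hp t hs2⟩
      intro hh
      rcases before_head p t with hb | hb
      · rw [hb] at hh
        exact hs1 ⟨hc, hh⟩
      · rw [hb.1] at hh
        exact hp (Option.some_inj.mp hh)
  termination_by s _ => s.length
  decreasing_by all_goals (simp_all; try omega)
theorem dhs_cons_space (u : List Char) : dhs (' ' :: u) = u := by rw [dhs]; simp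

theorem dhs_of_head_ne (s : List Char) (h : s.head? ≠ some ' ') : dhs s = s := by
  rw [dhs, if_neg h]

theorem noTwo_dhs (s : List Char) (h : ¬ [' ', ' '] <:+: s) : ¬ [' ', ' '] <:+: dhs s := by
  rw [dhs]
  split
  · cases s with
    | nil => simp
    | cons c t => exact (noTwo_cons c t h).2
  · exact h

theorem before_after (p : Char) (hp : p ≠ ' ') : ∀ (s : List Char), ¬ [' ', ' '] <:+: s →
    rrep ' ' [p] [p] (rrep p [' '] [p] s) = delP p s
  | [], _ => by rw [rrep_nil, rrep_nil, delP]
  | c :: t, hs => by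
    obtain ⟨hs1, hs2⟩ := noTwo_cons c t hs
    rw [two_cons]
    by_cases hm : c = p ∧ t.head? = some ' '
    · rw [if_pos hm]
      cases t with
      | nil => simp at hm
      | cons x u =>
        simp only [List.head?_cons, Option.some_inj] at hm
        obtain ⟨hc, hx⟩ := hm
        subst c
        subst hx
        obtain ⟨hu1, hu2⟩ := noTwo_cons ' ' u hs2
        simp only [List.tail_cons]
        rw [two_cons, if_neg (fun hb => hp hb.1), before_after p hp u hu2]
        rw [delP]
        rw [if_pos rfl, dhs_cons_space]
    · rw [if_neg hm]
      have hhead := after_head p t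
      rw [two_cons]
      by_cases hc : c = ' ' ∧ t.head? = some p
      · obtain ⟨hc1, hc2⟩ := hc
        subst c
        cases t with
        | nil => simp at hc2
        | cons x u =>
          simp only [List.head?_cons, Option.some_inj] at hc2
          subst x
          obtain ⟨hu1, hu2⟩ := noTwo_cons p u hs2
          rw [two_cons]
          by_cases hu : p = p ∧ u.head? = some ' '
          · rw [if_pos hu]
            cases u with
            | nil => simp at hu
            | cons y v =>
              simp only [List.head?_cons, Option.some_inj] at hu
              have hy := hu.2
              subst y
              obtain ⟨hv1, hv2⟩ := noTwo_cons ' ' v hu2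
              simp only [List.tail_cons, List.head?_cons]
              rw [if_pos (by simp)]
              try simp only [List.tail_cons]
              rw [before_after p hp v hv2]
              rw [delP, if_neg (fun h => hp h.symm), if_pos (by simp)]
              rw [delP, if_pos rfl, dhs_cons_space]
          · rw [if_neg hu]
            simp only [List.head?_cons]
            rw [if_pos (by simp)]
            simp only [List.tail_cons]
            rw [before_after p hp u hu2]
            rw [delP, if_neg (fun h => hp h.symm), if_pos (by simp)]
            rw [delP, if_pos rfl]
            have hune : u.head? ≠ some ' ' := fun hh => hu ⟨rfl, hh⟩
            rw [dhs_of_head_ne u hune]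
      · have hb : ¬ (c = ' ' ∧ (rrep p [' '] [p] t).head? = some p) := by
          rw [hhead]; exact hc
        rw [if_neg hb, before_after p hp t hs2]
        by_cases hcp : c = p
        · subst hcp
          rw [delP, if_pos rfl]
          have htne : t.head? ≠ some ' ' := fun hh => hm ⟨rfl, hh⟩
          rw [dhs_of_head_ne t htne]
        · rw [delP, if_neg hcp, if_neg hc]
  termination_by s _ => s.length
  decreasing_by all_goals (simp_all; try omega)
theorem delP_head (p : Char) (s : List Char) :
    (delP p s).head? = s.head? ∨ ((delP p s).head? = some p ∧ s.head? = some ' ') := by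
  cases s with
  | nil => left; rw [delP]
  | cons c t =>
    rw [delP]
    by_cases h1 : c = p
    · left; simp [h1]
    · rw [if_neg h1]
      by_cases h2 : c = ' ' ∧ t.head? = some p
      · obtain ⟨hc, ht⟩ := h2
        subst hc
        rw [if_pos ⟨rfl, ht⟩]
        cases t with
        | nil => simp at ht
        | cons x u =>
          simp only [List.head?_cons, Option.some_inj] at ht
          subst x
          right
          rw [delP, if_pos rfl]
          simp
      · rw [if_neg h2]
        left
        simp
theorem delE_delC : ∀ (s : List Char), ¬ [' ', ' '] <:+: s →
    delP '=' (delP ',' s) = allDel s ∧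
      delP '=' (dhs (delP ',' s)) = allDel (dhs s)
  | [], _ => by rw [delP]; rw [show dhs [] = [] from rfl, delP, allDel]; exact ⟨rfl, rfl⟩
  | c :: t, hs => by
    obtain ⟨hs1, hs2⟩ := noTwo_cons c t hs
    have main : delP '=' (delP ',' (c :: t)) = allDel (c :: t) := by
      by_cases h1 : c = ','
      · subst h1
        rw [delP, if_pos rfl]
        rw [delP, if_neg (by decide), if_neg (by simp)]
        rw [allDel, if_pos (Or.inl rfl)]
        rw [(delE_delC (dhs t) (noTwo_dhs t hs2)).1]
      · by_cases h2 : c = '='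
        · subst h2
          rw [delP, if_neg (by decide), if_neg (by simp)]
          rw [delP, if_pos rfl]
          rw [allDel, if_pos (Or.inr rfl)]
          rw [(delE_delC t hs2).2]
        · by_cases h3 : c = ' '
          · subst h3
            by_cases h4 : t.head? = some ','
            · rw [delP, if_neg (by decide), if_pos ⟨rfl, h4⟩]
              rw [allDel, if_neg (by decide), if_pos ⟨rfl, Or.inl h4⟩]
              exact (delE_delC t hs2).1
            · by_cases h5 : t.head? = some '='
              · cases t with
                | nil => simp at h5
                | cons x u =>
                  simp only [List.head?_cons, Option.some_inj] at h5
                  subst x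
                  obtain ⟨hu1, hu2⟩ := noTwo_cons '=' u hs2
                  have hCu : delP ',' ('=' :: u) = '=' :: delP ',' u := by
                    rw [delP, if_neg (by decide), if_neg (by simp)]
                  have hC : delP ',' (' ' :: '=' :: u) = ' ' :: '=' :: delP ',' u := by
                    rw [delP, if_neg (by decide), if_neg (by simp), hCu]
                  rw [hC]
                  rw [delP, if_neg (by decide), if_pos ⟨rfl, by simp⟩]
                  rw [delP, if_pos rfl]
                  rw [allDel, if_neg (by decide), if_pos ⟨rfl, Or.inr rfl⟩]
                  rw [allDel, if_pos (Or.inr rfl)]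
                  rw [(delE_delC u hu2).2]
              · rw [delP, if_neg (by decide), if_neg (by simp [h4])]
                have hne : ¬ (' ' = '=' ∧ (delP ',' t).head? = some '=') := by
                  rintro ⟨h, -⟩; exact (by decide : ¬ (' ' = '=')) h
                have hne2 : (delP ',' t).head? ≠ some '=' := by
                  rcases delP_head ',' t with hh | hh
                  · rw [hh]; exact h5
                  · rw [hh.1]; decide
                rw [delP, if_neg (by decide), if_neg (by simp [hne2])]
                rw [(delE_delC t hs2).1]
                rw [allDel, if_neg (by decide), if_neg (by simp [h4, h5])]
          · rw [delP, if_neg h1, if_neg (by simp [h3])]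
            rw [delP, if_neg h2, if_neg (by simp [h3])]
            rw [(delE_delC t hs2).1]
            rw [allDel, if_neg (by simp [h1, h2]), if_neg (by simp [h3])]
    refine ⟨main, ?_⟩
    by_cases hh : c = ' '
    · subst hh
      rw [dhs_cons_space]
      by_cases h4 : t.head? = some ','
      · cases t with
        | nil => simp at h4
        | cons x u =>
          simp only [List.head?_cons, Option.some_inj] at h4
          subst x
          rw [delP, if_neg (by decide), if_pos ⟨rfl, by simp⟩]
          have : dhs (delP ',' (',' :: u)) = delP ',' (',' :: u) := by
            apply dhs_of_head_ne
            rw [delP, if_pos rfl]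
            simp
          rw [this]
          exact (delE_delC (',' :: u) hs2).1
      · rw [delP, if_neg (by decide), if_neg (by simp [h4])]
        rw [dhs_cons_space]
        exact (delE_delC t hs2).1
    · have hdc : dhs (c :: t) = c :: t := dhs_of_head_ne _ (by simp [hh])
      rw [hdc]
      have hne : (delP ',' (c :: t)).head? ≠ some ' ' := by
        rcases delP_head ',' (c :: t) with hh2 | hh2
        · rw [hh2]; simp [hh]
        · exfalso
          have h2 := hh2.2
          simp only [List.head?_cons, Option.some_inj] at h2
          exact hh h2
      rw [dhs_of_head_ne _ hne]
      exact main
  termination_by s _ => s.length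
  decreasing_by all_goals (simp_all [dhs]; try split <;> simp_all <;> omega)
theorem pass2_allDel : ∀ (s : List Char) (prev : Option Char),
    (¬ (prev = some ',' ∨ prev = some '=') → pass2Alt prev s = allDel s) ∧
      ((prev = some ',' ∨ prev = some '=') → pass2Alt prev s = allDel (dhs s)) := by
  intro s
  induction s with
  | nil =>
    intro prev
    constructor <;> intro _ <;> rw [pass2Alt] <;> first
      | rw [allDel]
      | (rw [show dhs ([] : List Char) = [] from rfl, allDel])
  | cons c t ih =>
    intro prev
    constructor
    · intro hprev
      rw [pass2Alt]
      by_cases hcsp : c = ' '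
      · subst hcsp
        by_cases hnx : t.head? = some ',' ∨ t.head? = some '='
        · rw [if_pos ⟨rfl, Or.inr hnx⟩]
          rw [(ih (some ' ')).1 (by simp)]
          rw [allDel, if_neg (by decide), if_pos ⟨rfl, hnx⟩]
        · rw [if_neg (by
            rintro ⟨-, h | h⟩
            · exact hprev h
            · exact hnx h)]
          rw [(ih (some ' ')).1 (by simp)]
          rw [allDel, if_neg (by decide), if_neg (fun h => hnx h.2)]
      · rw [if_neg (by simp [hcsp])]
        by_cases hcp : c = ',' ∨ c = '='
        · rw [(ih (some c)).2 (by rcases hcp with h | h <;> simp [h])]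
          rw [allDel, if_pos hcp]
        · rw [(ih (some c)).1 (by simpa using hcp)]
          rw [allDel, if_neg hcp, if_neg (by simp [hcsp])]
    · intro hprev
      rw [pass2Alt]
      by_cases hcsp : c = ' '
      · subst hcsp
        rw [if_pos ⟨rfl, Or.inl hprev⟩, dhs_cons_space]
        exact (ih (some ' ')).1 (by simp)
      · rw [dhs_of_head_ne _ (by simp [hcsp])]
        rw [if_neg (by simp [hcsp])]
        by_cases hcp : c = ',' ∨ c = '='
        · rw [(ih (some c)).2 (by rcases hcp with h | h <;> simp [h])]
          rw [allDel, if_pos hcp]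
        · rw [(ih (some c)).1 (by simpa using hcp)]
          rw [allDel, if_neg hcp, if_neg (by simp [hcsp])]
theorem pass1_ddC : ∀ (s : List Char),
    (∀ (last : Option Char), last ≠ some ' ' → pass1Alt last s = ddC (s.filter (fun c => c ≠ '\t'))) ∧
      ' ' :: pass1Alt (some ' ') s = ddC (' ' :: s.filter (fun c => c ≠ '\t')) := by
  intro s
  induction s with
  | nil =>
    constructor
    · intro last _
      rw [pass1Alt]
      simp only [List.filter_nil]
      rw [ddC]
    · simp only [List.filter_nil]
      rw [pass1Alt, ddC, if_neg (by simp), ddC]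
  | cons c t ih =>
    constructor
    · intro last hlast
      rw [pass1Alt]
      by_cases htab : c = '\t'
      · subst htab
        rw [if_pos rfl]
        rw [show ('\t' :: t).filter (fun c => c ≠ '\t') = t.filter (fun c => c ≠ '\t') by simp]
        exact ih.1 last hlast
      · rw [if_neg htab]
        rw [show (c :: t).filter (fun c => c ≠ '\t') = c :: t.filter (fun c => c ≠ '\t') by
          simp [htab]]
        by_cases hsp : c = ' '
        · subst hsp
          rw [if_neg (by simp [hlast])]
          exact ih.2
        · rw [if_neg (by simp [hsp])]
          rw [ih.1 (some c) (by simp [hsp])]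
          rw [ddC, if_neg (by simp [hsp])]
    · rw [pass1Alt]
      by_cases htab : c = '\t'
      · subst htab
        rw [if_pos rfl]
        rw [show ('\t' :: t).filter (fun c => c ≠ '\t') = t.filter (fun c => c ≠ '\t') by simp]
        exact ih.2
      · rw [if_neg htab]
        rw [show (c :: t).filter (fun c => c ≠ '\t') = c :: t.filter (fun c => c ≠ '\t') by
          simp [htab]]
        by_cases hsp : c = ' '
        · subst hsp
          rw [if_pos ⟨rfl, rfl⟩]
          rw [show ddC (' ' :: ' ' :: t.filter (fun c => c ≠ '\t')) =
              ddC (' ' :: t.filter (fun c => c ≠ '\t')) by rw [ddC]; simp]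
          exact ih.2
        · rw [if_neg (by simp [hsp])]
          rw [show ddC (' ' :: c :: t.filter (fun c => c ≠ '\t')) =
              ' ' :: ddC (c :: t.filter (fun c => c ≠ '\t')) by rw [ddC]; simp [hsp]]
          rw [ddC, if_neg (by simp [hsp])]
          rw [ih.1 (some c) (by simp [hsp])]


theorem loop_del1 (c : Char) (f : Nat) (s : List Char) :
    pyStrWhileReplace [c] [] (f + 1) s = s.filter (fun x => x ≠ c) := by
  have hrep : ∀ u : List Char, PySem.Chars.replace u [c] [] = u.filter (fun x => x ≠ c) :=
    fun u => by rw [replace_eq_rrep, rr_singleton]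
  rw [loop_single [c] [] f s ?_ ?_, hrep]
  · rw [hrep]
    rw [PySem.Chars.isIn_eq_false_iff]
    rw [List.singleton_infix_iff]
    simp
  · intro h
    rw [PySem.Chars.isIn_eq_false_iff, List.singleton_infix_iff] at h
    rw [hrep, List.filter_eq_self.mpr]
    intro a ha
    simp
    rintro rfl
    exact h ha

theorem loop_collapse' (s : List Char) :
    pyStrWhileReplace [' ', ' '] [' '] (s.length + 1) s = ddC s :=
  loop_collapse _ _ (Nat.le_succ _)

theorem loop_after (p : Char) (f : Nat) (s : List Char) (hs : ¬ [' ', ' '] <:+: s) :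
    pyStrWhileReplace [p, ' '] [p] (f + 1) s = rrep p [' '] [p] s := by
  rw [loop_single [p, ' '] [p] f s ?_ ?_, replace_eq_rrep]
  · rw [replace_eq_rrep, PySem.Chars.isIn_eq_false_iff]
    exact after_no p s hs
  · intro h
    rw [PySem.Chars.isIn_eq_false_iff] at h
    rw [replace_eq_rrep, after_id p s h]

theorem loop_before (p : Char) (hp : p ≠ ' ') (f : Nat) (s : List Char)
    (hs : ¬ [' ', ' '] <:+: s) :
    pyStrWhileReplace [' ', p] [p] (f + 1) s = rrep ' ' [p] [p] s := by
  rw [loop_single [' ', p] [p] f s ?_ ?_, replace_eq_rrep]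
  · rw [replace_eq_rrep, PySem.Chars.isIn_eq_false_iff]
    exact before_no p hp s hs
  · intro h
    rw [PySem.Chars.isIn_eq_false_iff] at h
    rw [replace_eq_rrep, before_id p s h]

theorem strip_eq (v : List Char) :
    (if v.length = 0 then []
     else
       if (if v.head? = some ' ' then v.tail else v).length = 0 then []
       else
         if (if v.head? = some ' ' then v.tail else v).getLast? = some ' ' then
           (if v.head? = some ' ' then v.tail else v).dropLast
         else (if v.head? = some ' ' then v.tail else v)) =
    (if (if v.head? = some ' ' then v.tail else v).getLast? = some ' ' then
       (if v.head? = some ' ' then v.tail else v).dropLast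
     else (if v.head? = some ' ' then v.tail else v)) := by
  by_cases h0 : v.length = 0
  · obtain rfl : v = [] := List.length_eq_zero_iff.mp h0
    simp
  · rw [if_neg h0]
    by_cases h1 : (if v.head? = some ' ' then v.tail else v).length = 0
    · rw [if_pos h1]
      rw [List.length_eq_zero_iff.mp h1]
      simp
    · rw [if_neg h1]

theorem cleaned_eq (s : List Char) : whitespacesCleanedA s = cleanAlt s := by
  have hv1 : ¬ [' ', ' '] <:+: ddC (s.filter (fun x => x ≠ '\t')) := noTwo_ddC _
  have hv2 : ¬ [' ', ' '] <:+: rrep ',' [' '] [','] (ddC (s.filter (fun x => x ≠ '\t'))) :=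
    after_noTwo ',' (by decide) _ hv1
  have hv3 : ¬ [' ', ' '] <:+:
      rrep ' ' [','] [','] (rrep ',' [' '] [','] (ddC (s.filter (fun x => x ≠ '\t')))) :=
    before_noTwo ',' (by decide) _ hv2
  have hv4 : ¬ [' ', ' '] <:+:
      rrep '=' [' '] ['=']
        (rrep ' ' [','] [','] (rrep ',' [' '] [','] (ddC (s.filter (fun x => x ≠ '\t'))))) :=
    after_noTwo '=' (by decide) _ hv3
  unfold whitespacesCleanedA cleanAlt
  simp only [loop_del1, loop_collapse']
  rw [loop_after ',' _ _ hv1]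
  rw [loop_before ',' (by decide) _ _ hv2]
  rw [loop_after '=' _ _ hv3]
  rw [loop_before '=' (by decide) _ _ hv4]
  rw [before_after '=' (by decide) _ hv3]
  rw [before_after ',' (by decide) _ hv1]
  rw [(delE_delC _ hv1).1]
  rw [show allDel (ddC (s.filter (fun x => x ≠ '\t'))) =
      pass2Alt none (ddC (s.filter (fun x => x ≠ '\t'))) from
    ((pass2_allDel _ none).1 (by simp)).symm]
  rw [show ddC (s.filter (fun x => x ≠ '\t')) = pass1Alt none s from
    ((pass1_ddC s).1 none (by simp)).symm]
  exact strip_eq _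

theorem mainTail (s : List Char) :
    pyStrWhileReplace ['}'] [] ((whitespacesCleanedA s).length + 1) (whitespacesCleanedA s)
      = PySem.Chars.replace (cleanAlt s) ['}'] [] := by
  rw [cleaned_eq s, loop_del1, replace_eq_rrep, rr_singleton]

-- ===== VERDICT (by name: the statement is the Claim_ definition above) =====
theorem namespaceFromLine_spec : Claim_equal_namespaceFromLine := by
  intro line _
  show String.ofList _ = String.ofList _
  exact congrArg String.ofList (mainTail _)
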